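-- pv_equiv track=rewrite | github.com/MaksIMMum/TamagochiFit | app/config/pet_types.py | get_species_for_level
-- ===== SOURCE A (Python) =====
-- from typing import Dict, List
--
-- PET_TYPES = {
--     "blue": {
--         "name": "Blue Pet",
--         "emoji": "🔵",
--         "evolution_chain": {
--             1: {"species": "egg", "emoji": "🥚", "image": "/static/images/characters/blue egg.png"},
--             2: {"species": "newborn", "emoji": "🐣", "image": "/static/images/characters/blue newborn.png"},
--             3: {"species": "kid", "emoji": "🐤", "image": "/static/images/characters/blue kid.png"},
--             5: {"species": "teen", "emoji": "🐦", "image": "/static/images/characters/blue teen.png"},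
--             8: {"species": "adult", "emoji": "🦅", "image": "/static/images/characters/blue adult.png"},
--             12: {"species": "final_form", "emoji": "✨", "image": "/static/images/characters/blue final form.png"},
--         }
--     },
--     "cherry": {
--         "name": "Cherry Pet",
--         "emoji": "🍒",
--         "evolution_chain": {
--             1: {"species": "egg", "emoji": "🥚", "image": "/static/images/characters/blue egg.png"},  # reuse egg
--             2: {"species": "newborn", "emoji": "🐣", "image": "/static/images/characters/cherry newborn.png"},
--             3: {"species": "kid", "emoji": "🐤", "image": "/static/images/characters/cherry kid.png"},
--             5: {"species": "teen", "emoji": "🐦", "image": "/static/images/characters/cherry teen.png"},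
--             8: {"species": "adult", "emoji": "🦅", "image": "/static/images/characters/cherry adult.png"},
--             12: {"species": "final_form", "emoji": "✨", "image": "/static/images/characters/cherry adult.png"},  # fallback
--         }
--     },
--     "cyan": {
--         "name": "Cyan Pet",
--         "emoji": "🔷",
--         "evolution_chain": {
--             1: {"species": "egg", "emoji": "🥚", "image": "/static/images/characters/blue egg.png"},  # reuse egg
--             2: {"species": "newborn", "emoji": "🐣", "image": "/static/images/characters/cyan newborn.png"},
--             3: {"species": "child", "emoji": "🐤", "image": "/static/images/characters/cyan child.png"},
--             5: {"species": "teen", "emoji": "🐦", "image": "/static/images/characters/cyan teen.png"},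
--             8: {"species": "adult", "emoji": "🦅", "image": "/static/images/characters/cyan adult.png"},
--             12: {"species": "final_form", "emoji": "✨", "image": "/static/images/characters/cyan adult.png"},  # fallback
--         }
--     },
--     "dark_blue": {
--         "name": "Dark Blue Pet",
--         "emoji": "🔵",
--         "evolution_chain": {
--             1: {"species": "egg", "emoji": "🥚", "image": "/static/images/characters/blue egg.png"},  # reuse egg
--             2: {"species": "newborn", "emoji": "🐣", "image": "/static/images/characters/dark blue newborn.png"},
--             3: {"species": "child", "emoji": "🐤", "image": "/static/images/characters/dark blue child.png"},
--             5: {"species": "teen", "emoji": "🐦", "image": "/static/images/characters/dark blue teen.png"},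
--             8: {"species": "adult", "emoji": "🦅", "image": "/static/images/characters/dark blue adult.png"},
--             12: {"species": "final_form", "emoji": "✨", "image": "/static/images/characters/dark blue adult.png"},  # fallback
--         }
--     },
--     "green": {
--         "name": "Green Pet",
--         "emoji": "🟢",
--         "evolution_chain": {
--             1: {"species": "egg", "emoji": "🥚", "image": "/static/images/characters/blue egg.png"},  # reuse egg
--             2: {"species": "newborn", "emoji": "🐣", "image": "/static/images/characters/green newborn.png"},
--             3: {"species": "child", "emoji": "🐤", "image": "/static/images/characters/green child.png"},
--             5: {"species": "teen", "emoji": "🐦", "image": "/static/images/characters/green teen.png"},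
--             8: {"species": "adult", "emoji": "🦅", "image": "/static/images/characters/green adult.png"},
--             12: {"species": "final_form", "emoji": "✨", "image": "/static/images/characters/green adult.png"},  # fallback
--         }
--     },
--     "purple": {
--         "name": "Purple Pet",
--         "emoji": "🟣",
--         "evolution_chain": {
--             1: {"species": "egg", "emoji": "🥚", "image": "/static/images/characters/blue egg.png"},
--             2: {"species": "newborn", "emoji": "🐣", "image": "/static/images/characters/purple newborn.png"},
--             3: {"species": "child", "emoji": "🐤", "image": "/static/images/characters/purple child.png"},
--             5: {"species": "teen", "emoji": "🐦", "image": "/static/images/characters/purple teen.png"},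
--             8: {"species": "adult", "emoji": "🦅", "image": "/static/images/characters/purple adult.png"},
--             12: {"species": "final_form", "emoji": "✨", "image": "/static/images/characters/purple adult.png"},
--         }
--     },
-- }
--
-- def get_pet_type(pet_type_id: str) -> Dict:
--     """Get pet type config by ID. Raises ValueError if not found."""
--     if pet_type_id not in PET_TYPES:
--         raise ValueError(f"Unknown pet type: {pet_type_id}")
--     return PET_TYPES[pet_type_id]
--
-- def get_species_for_level(pet_type_id: str, level: int) -> Dict:
--     """
--     Get the species, emoji, and image for a given pet type at a specific level.
--     Returns {"species": str, "emoji": str, "image": str}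
--     """
--     pet_type = get_pet_type(pet_type_id)
--     evolution_chain = pet_type["evolution_chain"]
--
--     # Find the highest level threshold that doesn't exceed current level
--     current_species = None
--     for level_threshold in sorted(evolution_chain.keys()):
--         if level >= level_threshold:
--             current_species = evolution_chain[level_threshold]
--
--     return current_species or evolution_chain[1]
-- ===== SOURCE B (Python) =====
-- # B: compact per-pet stage tables (descending thresholds), shared emoji map and
-- # path prefix; first-match scan from the top instead of accumulate-last over sorted keys.
--
-- _EMOJI = {1: "🥚", 2: "🐣", 3: "🐤", 5: "🐦", 8: "🦅", 12: "✨"}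
-- _PATH = "/static/images/characters/"
--
-- # (threshold, species, image-name) triples, highest threshold first.
-- _STAGES = {
--     "blue": [
--         (12, "final_form", "blue final form"),
--         (8, "adult", "blue adult"),
--         (5, "teen", "blue teen"),
--         (3, "kid", "blue kid"),
--         (2, "newborn", "blue newborn"),
--         (1, "egg", "blue egg"),
--     ],
--     "cherry": [
--         (12, "final_form", "cherry adult"),
--         (8, "adult", "cherry adult"),
--         (5, "teen", "cherry teen"),
--         (3, "kid", "cherry kid"),
--         (2, "newborn", "cherry newborn"),
--         (1, "egg", "blue egg"),
--     ],
--     "cyan": [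
--         (12, "final_form", "cyan adult"),
--         (8, "adult", "cyan adult"),
--         (5, "teen", "cyan teen"),
--         (3, "child", "cyan child"),
--         (2, "newborn", "cyan newborn"),
--         (1, "egg", "blue egg"),
--     ],
--     "dark_blue": [
--         (12, "final_form", "dark blue adult"),
--         (8, "adult", "dark blue adult"),
--         (5, "teen", "dark blue teen"),
--         (3, "child", "dark blue child"),
--         (2, "newborn", "dark blue newborn"),
--         (1, "egg", "blue egg"),
--     ],
--     "green": [
--         (12, "final_form", "green adult"),
--         (8, "adult", "green adult"),
--         (5, "teen", "green teen"),
--         (3, "child", "green child"),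
--         (2, "newborn", "green newborn"),
--         (1, "egg", "blue egg"),
--     ],
--     "purple": [
--         (12, "final_form", "purple adult"),
--         (8, "adult", "purple adult"),
--         (5, "teen", "purple teen"),
--         (3, "child", "purple child"),
--         (2, "newborn", "purple newborn"),
--         (1, "egg", "blue egg"),
--     ],
-- }
--
--
-- def _entry(threshold, species, image_name):
--     return {"species": species, "emoji": _EMOJI[threshold],
--             "image": _PATH + image_name + ".png"}
--
--
-- def get_species_for_level(pet_type_id: str, level: int):
--     """First stage (scanning from the highest threshold down) whose threshold <= level;
--     below the lowest threshold, the lowest stage."""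
--     if pet_type_id not in _STAGES:
--         raise ValueError(f"Unknown pet type: {pet_type_id}")
--     stages = _STAGES[pet_type_id]
--     for threshold, species, image_name in stages:
--         if level >= threshold:
--             return _entry(threshold, species, image_name)
--     threshold, species, image_name = stages[-1]
--     return _entry(threshold, species, image_name)
-- ===== Notes on version B (the rewrite author's own statement) =====
-- stated objective: simpler
-- what changed: Replaced the accumulate-last scan over sorted ascending dict keys with a first-match scan over compact descending (threshold, species, image-name) stage tables, with a shared emoji map and image-path prefix factored out of the data.
-- outside the precondition, e.g. on get_species_for_level('pink', 3): A raises ValueError, B raises ValueError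
import Mathlib
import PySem

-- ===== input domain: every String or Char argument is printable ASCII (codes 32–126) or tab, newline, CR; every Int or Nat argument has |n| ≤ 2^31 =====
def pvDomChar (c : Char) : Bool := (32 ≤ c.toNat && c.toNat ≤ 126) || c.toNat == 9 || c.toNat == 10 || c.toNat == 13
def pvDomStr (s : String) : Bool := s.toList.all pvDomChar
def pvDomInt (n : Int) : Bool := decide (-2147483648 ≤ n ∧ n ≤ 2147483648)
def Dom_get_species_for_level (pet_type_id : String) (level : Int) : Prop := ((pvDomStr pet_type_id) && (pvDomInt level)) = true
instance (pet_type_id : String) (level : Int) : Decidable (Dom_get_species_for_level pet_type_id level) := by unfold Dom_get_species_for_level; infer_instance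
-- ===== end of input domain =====

-- B re-tables the data (compact descending (threshold, species, image-name) stage lists with a
-- shared emoji map and path prefix) and returns the FIRST stage whose threshold ≤ level, instead
-- of A's accumulate-last scan over the full ascending dicts; equality proved on Pre_ (known ids).

-- ===== PORT A =====
-- A's PET_TYPES "evolution_chain" dicts — the only fields get_species_for_level reads;
-- inner dicts are association lists per the type convention.
def chainBlue : PySem.Dict Int (List (String × String)) := PySem.Dict.ofList [
  (1, [("species", "egg"), ("emoji", "🥚"), ("image", "/static/images/characters/blue egg.png")]),
  (2, [("species", "newborn"), ("emoji", "🐣"), ("image", "/static/images/characters/blue newborn.png")]),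
  (3, [("species", "kid"), ("emoji", "🐤"), ("image", "/static/images/characters/blue kid.png")]),
  (5, [("species", "teen"), ("emoji", "🐦"), ("image", "/static/images/characters/blue teen.png")]),
  (8, [("species", "adult"), ("emoji", "🦅"), ("image", "/static/images/characters/blue adult.png")]),
  (12, [("species", "final_form"), ("emoji", "✨"), ("image", "/static/images/characters/blue final form.png")])]
def chainCherry : PySem.Dict Int (List (String × String)) := PySem.Dict.ofList [
  (1, [("species", "egg"), ("emoji", "🥚"), ("image", "/static/images/characters/blue egg.png")]),
  (2, [("species", "newborn"), ("emoji", "🐣"), ("image", "/static/images/characters/cherry newborn.png")]),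
  (3, [("species", "kid"), ("emoji", "🐤"), ("image", "/static/images/characters/cherry kid.png")]),
  (5, [("species", "teen"), ("emoji", "🐦"), ("image", "/static/images/characters/cherry teen.png")]),
  (8, [("species", "adult"), ("emoji", "🦅"), ("image", "/static/images/characters/cherry adult.png")]),
  (12, [("species", "final_form"), ("emoji", "✨"), ("image", "/static/images/characters/cherry adult.png")])]
def chainCyan : PySem.Dict Int (List (String × String)) := PySem.Dict.ofList [
  (1, [("species", "egg"), ("emoji", "🥚"), ("image", "/static/images/characters/blue egg.png")]),
  (2, [("species", "newborn"), ("emoji", "🐣"), ("image", "/static/images/characters/cyan newborn.png")]),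
  (3, [("species", "child"), ("emoji", "🐤"), ("image", "/static/images/characters/cyan child.png")]),
  (5, [("species", "teen"), ("emoji", "🐦"), ("image", "/static/images/characters/cyan teen.png")]),
  (8, [("species", "adult"), ("emoji", "🦅"), ("image", "/static/images/characters/cyan adult.png")]),
  (12, [("species", "final_form"), ("emoji", "✨"), ("image", "/static/images/characters/cyan adult.png")])]
def chainDarkBlue : PySem.Dict Int (List (String × String)) := PySem.Dict.ofList [
  (1, [("species", "egg"), ("emoji", "🥚"), ("image", "/static/images/characters/blue egg.png")]),
  (2, [("species", "newborn"), ("emoji", "🐣"), ("image", "/static/images/characters/dark blue newborn.png")]),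
  (3, [("species", "child"), ("emoji", "🐤"), ("image", "/static/images/characters/dark blue child.png")]),
  (5, [("species", "teen"), ("emoji", "🐦"), ("image", "/static/images/characters/dark blue teen.png")]),
  (8, [("species", "adult"), ("emoji", "🦅"), ("image", "/static/images/characters/dark blue adult.png")]),
  (12, [("species", "final_form"), ("emoji", "✨"), ("image", "/static/images/characters/dark blue adult.png")])]
def chainGreen : PySem.Dict Int (List (String × String)) := PySem.Dict.ofList [
  (1, [("species", "egg"), ("emoji", "🥚"), ("image", "/static/images/characters/blue egg.png")]),
  (2, [("species", "newborn"), ("emoji", "🐣"), ("image", "/static/images/characters/green newborn.png")]),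
  (3, [("species", "child"), ("emoji", "🐤"), ("image", "/static/images/characters/green child.png")]),
  (5, [("species", "teen"), ("emoji", "🐦"), ("image", "/static/images/characters/green teen.png")]),
  (8, [("species", "adult"), ("emoji", "🦅"), ("image", "/static/images/characters/green adult.png")]),
  (12, [("species", "final_form"), ("emoji", "✨"), ("image", "/static/images/characters/green adult.png")])]
def chainPurple : PySem.Dict Int (List (String × String)) := PySem.Dict.ofList [
  (1, [("species", "egg"), ("emoji", "🥚"), ("image", "/static/images/characters/blue egg.png")]),
  (2, [("species", "newborn"), ("emoji", "🐣"), ("image", "/static/images/characters/purple newborn.png")]),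
  (3, [("species", "child"), ("emoji", "🐤"), ("image", "/static/images/characters/purple child.png")]),
  (5, [("species", "teen"), ("emoji", "🐦"), ("image", "/static/images/characters/purple teen.png")]),
  (8, [("species", "adult"), ("emoji", "🦅"), ("image", "/static/images/characters/purple adult.png")]),
  (12, [("species", "final_form"), ("emoji", "✨"), ("image", "/static/images/characters/purple adult.png")])]

def petChains : PySem.Dict String (PySem.Dict Int (List (String × String))) := PySem.Dict.ofList [
  ("blue", chainBlue),
  ("cherry", chainCherry),
  ("cyan", chainCyan),
  ("dark_blue", chainDarkBlue),
  ("green", chainGreen),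
  ("purple", chainPurple)]

-- The body of A's loop over the chain: linear scan over sorted keys keeping the last
-- threshold ≤ level, then Python's `current_species or evolution_chain[1]`
-- (a dict is falsy iff empty, hence the isEmpty test).
def speciesScan (evolution_chain : PySem.Dict Int (List (String × String))) (level : Int) : List (String × String) :=
  let current_species : Option (List (String × String)) :=
    (PySem.List.sorted evolution_chain.keys id).foldl
      (fun acc level_threshold =>
        if level ≥ level_threshold then some (evolution_chain.getD level_threshold []) else acc)
      none
  match current_species with
  | some s => if s.isEmpty then evolution_chain.getD 1 [] else s
  | none => evolution_chain.getD 1 []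

-- Port of A; get_pet_type raises ValueError on an unknown id (the `none` branch, excluded by Pre_).
def get_species_for_level (pet_type_id : String) (level : Int) : List (String × String) :=
  match petChains.get? pet_type_id with
  | none => []  -- ValueError in Python; excluded by Pre_
  | some evolution_chain => speciesScan evolution_chain level

-- ===== PORT B =====
-- B's data: per pet a descending list of (threshold, species, image-name) triples,
-- a shared threshold→emoji map and the common image-path prefix (Source B's _EMOJI/_PATH/_STAGES).
def emojiMap : PySem.Dict Int String := PySem.Dict.ofList
  [(1, "🥚"), (2, "🐣"), (3, "🐤"), (5, "🐦"), (8, "🦅"), (12, "✨")]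
def pathPrefix : String := "/static/images/characters/"

def stagesBlue : List (Int × String × String) :=
  [(12, "final_form", "blue final form"), (8, "adult", "blue adult"), (5, "teen", "blue teen"),
   (3, "kid", "blue kid"), (2, "newborn", "blue newborn"), (1, "egg", "blue egg")]
def stagesCherry : List (Int × String × String) :=
  [(12, "final_form", "cherry adult"), (8, "adult", "cherry adult"), (5, "teen", "cherry teen"),
   (3, "kid", "cherry kid"), (2, "newborn", "cherry newborn"), (1, "egg", "blue egg")]
def stagesCyan : List (Int × String × String) :=
  [(12, "final_form", "cyan adult"), (8, "adult", "cyan adult"), (5, "teen", "cyan teen"),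
   (3, "child", "cyan child"), (2, "newborn", "cyan newborn"), (1, "egg", "blue egg")]
def stagesDarkBlue : List (Int × String × String) :=
  [(12, "final_form", "dark blue adult"), (8, "adult", "dark blue adult"), (5, "teen", "dark blue teen"),
   (3, "child", "dark blue child"), (2, "newborn", "dark blue newborn"), (1, "egg", "blue egg")]
def stagesGreen : List (Int × String × String) :=
  [(12, "final_form", "green adult"), (8, "adult", "green adult"), (5, "teen", "green teen"),
   (3, "child", "green child"), (2, "newborn", "green newborn"), (1, "egg", "blue egg")]
def stagesPurple : List (Int × String × String) :=
  [(12, "final_form", "purple adult"), (8, "adult", "purple adult"), (5, "teen", "purple teen"),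
   (3, "child", "purple child"), (2, "newborn", "purple newborn"), (1, "egg", "blue egg")]

def petStages : PySem.Dict String (List (Int × String × String)) := PySem.Dict.ofList [
  ("blue", stagesBlue),
  ("cherry", stagesCherry),
  ("cyan", stagesCyan),
  ("dark_blue", stagesDarkBlue),
  ("green", stagesGreen),
  ("purple", stagesPurple)]

-- Source B's _entry: string + is PySem.Str.join ""; _EMOJI[t] always hits (thresholds come from the
-- tables), so getD "" is exact here.
def mkEntry (t : Int) (sp img : String) : List (String × String) :=
  [("species", sp), ("emoji", emojiMap.getD t ""),
   ("image", PySem.Str.join "" [pathPrefix, img, ".png"])]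

-- Source B's `for … in stages: if level >= threshold: return _entry(…)` — early-return loop.
def scanStages (stages : List (Int × String × String)) (level : Int) : Option (List (String × String)) :=
  match stages with
  | [] => none
  | (t, sp, img) :: rest => if level ≥ t then some (mkEntry t sp img) else scanStages rest level

-- Port of B (Source B); same ValueError branch on an unknown id; the fallthrough takes stages[-1]
-- (pyGet? -1; the tables are nonempty so the none branch is dead).
def get_species_for_level_alt (pet_type_id : String) (level : Int) : List (String × String) :=
  match petStages.get? pet_type_id with
  | none => []  -- ValueError in Python; excluded by Pre_
  | some stages =>
    match scanStages stages level with
    | some e => e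
    | none =>
      match PySem.List.pyGet? stages (-1) with
      | some (t, sp, img) => mkEntry t sp img
      | none => []

-- ===== PRECONDITION & SPEC =====
-- Pre_ excludes exactly the unknown pet-type ids, on which A raises ValueError.
def Pre_get_species_for_level (pet_type_id : String) (level : Int) : Prop :=
  pet_type_id ∈ ["blue", "cherry", "cyan", "dark_blue", "green", "purple"]
instance (pet_type_id : String) (level : Int) : Decidable (Pre_get_species_for_level pet_type_id level) := by unfold Pre_get_species_for_level; infer_instance
def pvWitness_get_species_for_level : String × Int := ("blue", 7)

def Spec_get_species_for_level (pet_type_id : String) (level : Int) (out : List (String × String)) : Prop := out = get_species_for_level_alt pet_type_id level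
instance (pet_type_id : String) (level : Int) (out : List (String × String)) : Decidable (Spec_get_species_for_level pet_type_id level out) := by unfold Spec_get_species_for_level; infer_instance

-- ===== CLAIM =====
def Claim_equal_get_species_for_level : Prop := ∀ (pet_type_id : String) (level : Int), Dom_get_species_for_level pet_type_id level → Pre_get_species_for_level pet_type_id level → Spec_get_species_for_level pet_type_id level (get_species_for_level pet_type_id level)

-- ===== LEMMAS AND PROOFS =====
-- Per pet type: A's accumulate-last scan over the ascending sorted keys equals B's first-match
-- scan over the descending stage table (plus B's last-stage fallthrough) for every level.
-- After split_ifs the shared threshold conditions collapse and every branch goal is closed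
-- (both sides pick the entry of the greatest satisfied threshold, or the level-1 entry).

set_option maxHeartbeats 1000000 in
lemma blue_agree (level : Int) : speciesScan chainBlue level = get_species_for_level_alt "blue" level := by
  have hk : PySem.List.sorted chainBlue.keys id = [1, 2, 3, 5, 8, 12] := by decide
  simp only [speciesScan, get_species_for_level_alt, scanStages, stagesBlue, hk, List.foldl,
    show petStages.get? "blue" = some stagesBlue from rfl]
  split_ifs <;> decide

set_option maxHeartbeats 1000000 in
lemma cherry_agree (level : Int) : speciesScan chainCherry level = get_species_for_level_alt "cherry" level := by
  have hk : PySem.List.sorted chainCherry.keys id = [1, 2, 3, 5, 8, 12] := by decide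
  simp only [speciesScan, get_species_for_level_alt, scanStages, stagesCherry, hk, List.foldl,
    show petStages.get? "cherry" = some stagesCherry from rfl]
  split_ifs <;> decide

set_option maxHeartbeats 1000000 in
lemma cyan_agree (level : Int) : speciesScan chainCyan level = get_species_for_level_alt "cyan" level := by
  have hk : PySem.List.sorted chainCyan.keys id = [1, 2, 3, 5, 8, 12] := by decide
  simp only [speciesScan, get_species_for_level_alt, scanStages, stagesCyan, hk, List.foldl,
    show petStages.get? "cyan" = some stagesCyan from rfl]
  split_ifs <;> decide

set_option maxHeartbeats 1000000 in
lemma dark_blue_agree (level : Int) : speciesScan chainDarkBlue level = get_species_for_level_alt "dark_blue" level := by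
  have hk : PySem.List.sorted chainDarkBlue.keys id = [1, 2, 3, 5, 8, 12] := by decide
  simp only [speciesScan, get_species_for_level_alt, scanStages, stagesDarkBlue, hk, List.foldl,
    show petStages.get? "dark_blue" = some stagesDarkBlue from rfl]
  split_ifs <;> decide

set_option maxHeartbeats 1000000 in
lemma green_agree (level : Int) : speciesScan chainGreen level = get_species_for_level_alt "green" level := by
  have hk : PySem.List.sorted chainGreen.keys id = [1, 2, 3, 5, 8, 12] := by decide
  simp only [speciesScan, get_species_for_level_alt, scanStages, stagesGreen, hk, List.foldl,
    show petStages.get? "green" = some stagesGreen from rfl]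
  split_ifs <;> decide

set_option maxHeartbeats 1000000 in
lemma purple_agree (level : Int) : speciesScan chainPurple level = get_species_for_level_alt "purple" level := by
  have hk : PySem.List.sorted chainPurple.keys id = [1, 2, 3, 5, 8, 12] := by decide
  simp only [speciesScan, get_species_for_level_alt, scanStages, stagesPurple, hk, List.foldl,
    show petStages.get? "purple" = some stagesPurple from rfl]
  split_ifs <;> decide

-- ===== VERDICT =====
theorem get_species_for_level_spec : Claim_equal_get_species_for_level := by
  intro pet_type_id level _ hpre
  unfold Spec_get_species_for_level get_species_for_level
  simp only [Pre_get_species_for_level, List.mem_cons, List.not_mem_nil, or_false] at hpre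
  rcases hpre with h | h | h | h | h | h <;> subst h
  · rw [show petChains.get? "blue" = some chainBlue from rfl]; exact blue_agree level
  · rw [show petChains.get? "cherry" = some chainCherry from rfl]; exact cherry_agree level
  · rw [show petChains.get? "cyan" = some chainCyan from rfl]; exact cyan_agree level
  · rw [show petChains.get? "dark_blue" = some chainDarkBlue from rfl]; exact dark_blue_agree level
  · rw [show petChains.get? "green" = some chainGreen from rfl]; exact green_agree level
  · rw [show petChains.get? "purple" = some chainPurple from rfl]; exact purple_agree level
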